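-- pv_equiv track=rewrite | github.com/Crescent0kt/baekjoon | 프로그래머스/unrated/120956. 옹알이 （1）/옹알이 （1）.py | solution
-- ===== SOURCE A (Python) =====
-- def solution(babbling):
--     answer = 0
--     for bab in babbling:
--         t= bab
--         check = True
--         while check != False:
--             check = False
--             if t[:3] == "aya":
--                 t = t[3:]
--                 check = True
--             elif t[:2] == "ye":
--                 t = t[2:]
--                 check = True
--             elif t[:3] == "woo":
--                 t = t[3:]
--                 check = True
--             elif t[:2] == "ma":
--                 t = t[2:]
--                 check = True
--         else:
--             if t == "":
--                 answer+=1
--     return answer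
-- ===== SOURCE B (Python) =====
-- import re
--
-- _BABBLE = re.compile(r'(?:aya|ye|woo|ma)*')
--
-- def solution(babbling):
--     return sum(1 for bab in babbling if _BABBLE.fullmatch(bab))
-- ===== Notes on version B (the rewrite author's own statement) =====
-- stated objective: idiomatic
-- what changed: Replaced the flag-driven while-loop that greedily strips one recognised prefix per pass with a single precompiled regex fullmatch against (?:aya|ye|woo|ma)* and a sum over the list.
import Mathlib
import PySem

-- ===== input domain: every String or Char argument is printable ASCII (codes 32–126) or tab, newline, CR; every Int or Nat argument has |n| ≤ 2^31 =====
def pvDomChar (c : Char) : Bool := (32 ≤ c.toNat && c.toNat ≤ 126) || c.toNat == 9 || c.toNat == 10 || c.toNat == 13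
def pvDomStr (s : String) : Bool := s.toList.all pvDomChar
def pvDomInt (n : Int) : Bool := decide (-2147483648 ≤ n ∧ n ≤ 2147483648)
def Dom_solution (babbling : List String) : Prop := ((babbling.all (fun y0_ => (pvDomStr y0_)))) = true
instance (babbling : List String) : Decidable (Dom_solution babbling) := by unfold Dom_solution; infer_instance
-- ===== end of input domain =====

-- B replaces A's flag-driven greedy prefix-stripping while-loop with a regex fullmatch
-- against (aya|ye|woo|ma)* (counted with sum); objective: idiomatic.

-- ===== PORT A =====
-- A's inner while loop: each pass strips one recognised prefix and re-raises the flag;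
-- the loop exits with the residual string. Ported as recursion on the residual.
def stripA (t : List Char) : List Char :=
  if t.take 3 = ['a','y','a'] then stripA (t.drop 3)
  else if t.take 2 = ['y','e'] then stripA (t.drop 2)
  else if t.take 3 = ['w','o','o'] then stripA (t.drop 3)
  else if t.take 2 = ['m','a'] then stripA (t.drop 2)
  else t
termination_by t.length
decreasing_by
  · have := congrArg List.length ‹t.take 3 = _›; simp [Nat.min_def] at this
    simp; omega
  · have := congrArg List.length ‹t.take 2 = _›; simp [Nat.min_def] at this
    simp; omega
  · have := congrArg List.length ‹t.take 3 = _›; simp [Nat.min_def] at this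
    simp; omega
  · have := congrArg List.length ‹t.take 2 = _›; simp [Nat.min_def] at this
    simp; omega

def solution (babbling : List String) : Int :=
  babbling.foldl (fun answer bab => if stripA bab.toList = [] then answer + 1 else answer) 0

-- ===== PORT B =====
-- re.fullmatch(r'(?:aya|ye|woo|ma)*', bab): ported by hand (no regex engine in Lean) as the
-- backtracking matcher for exactly this pattern — zero repetitions accept the empty string,
-- otherwise try the four alternatives in order; exact on all inputs.
def babMatch : List Char → Bool
  | [] => true
  | c :: cs =>
      (if c = 'a' ∧ cs.take 2 = ['y','a'] then babMatch (cs.drop 2) else false) ||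
      (if c = 'y' ∧ cs.take 1 = ['e'] then babMatch (cs.drop 1) else false) ||
      (if c = 'w' ∧ cs.take 2 = ['o','o'] then babMatch (cs.drop 2) else false) ||
      (if c = 'm' ∧ cs.take 1 = ['a'] then babMatch (cs.drop 1) else false)
termination_by t => t.length
decreasing_by all_goals simp

def solution_alt (babbling : List String) : Int :=
  ((babbling.countP (fun bab => babMatch bab.toList) : Nat) : Int)

-- ===== PRECONDITION & SPEC =====
def Spec_solution (babbling : List String) (out : Int) : Prop := out = solution_alt babbling
instance (babbling : List String) (out : Int) : Decidable (Spec_solution babbling out) := by unfold Spec_solution; infer_instance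

-- ===== CLAIM (what is proved, stated in full; the proofs are below) =====
def Claim_equal_solution : Prop := ∀ (babbling : List String), Dom_solution babbling → Spec_solution babbling (solution babbling)

-- ===== LEMMAS AND PROOFS =====

-- The four prefixes begin with four distinct letters, so at most one alternative of the
-- matcher fires and it coincides with the prefix A's greedy loop strips.
theorem babMatch_eq_stripA (t : List Char) : babMatch t = decide (stripA t = []) := by
  induction t using babMatch.induct with
  | case1 => simp [babMatch, stripA]
  | case2 c cs =>
    rename_i ihd2 ihd1
    rw [babMatch, stripA]
    by_cases h1 : c = 'a' ∧ cs.take 2 = ['y','a']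
    · have ht : (c :: cs).take 3 = ['a','y','a'] := by
        obtain ⟨rfl, h⟩ := h1; simp [List.take_succ_cons, h]
      simp only [if_pos h1, if_pos ht, List.drop_succ_cons]
      have h2 : ¬ (c = 'y' ∧ cs.take 1 = ['e']) := by rintro ⟨rfl, -⟩; exact absurd h1.1 (by decide)
      have h3 : ¬ (c = 'w' ∧ cs.take 2 = ['o','o']) := by rintro ⟨rfl, -⟩; exact absurd h1.1 (by decide)
      have h4 : ¬ (c = 'm' ∧ cs.take 1 = ['a']) := by rintro ⟨rfl, -⟩; exact absurd h1.1 (by decide)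
      simp [h2, h3, h4, ihd2]
    · have ht1 : ¬ (c :: cs).take 3 = ['a','y','a'] := by
        intro h; apply h1
        simp [List.take_succ_cons] at h; exact ⟨h.1, h.2⟩
      by_cases h2 : c = 'y' ∧ cs.take 1 = ['e']
      · have ht : (c :: cs).take 2 = ['y','e'] := by
          obtain ⟨rfl, h⟩ := h2; simp [List.take_succ_cons, h]
        simp only [if_neg h1, if_pos h2, if_neg ht1, if_pos ht, List.drop_succ_cons]
        have h3 : ¬ (c = 'w' ∧ cs.take 2 = ['o','o']) := by rintro ⟨rfl, -⟩; exact absurd h2.1 (by decide)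
        have h4 : ¬ (c = 'm' ∧ cs.take 1 = ['a']) := by rintro ⟨rfl, -⟩; exact absurd h2.1 (by decide)
        simpa [h3, h4] using ihd1
      · have ht2 : ¬ (c :: cs).take 2 = ['y','e'] := by
          intro h; apply h2
          simp [List.take_succ_cons] at h; exact ⟨h.1, h.2⟩
        by_cases h3 : c = 'w' ∧ cs.take 2 = ['o','o']
        · have ht : (c :: cs).take 3 = ['w','o','o'] := by
            obtain ⟨rfl, h⟩ := h3; simp [List.take_succ_cons, h]
          simp only [if_neg h1, if_neg h2, if_pos h3, if_neg ht1, if_neg ht2, if_pos ht,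
            List.drop_succ_cons]
          have h4 : ¬ (c = 'm' ∧ cs.take 1 = ['a']) := by rintro ⟨rfl, -⟩; exact absurd h3.1 (by decide)
          simp [h4, ihd2]
        · have ht3 : ¬ (c :: cs).take 3 = ['w','o','o'] := by
            intro h; apply h3
            simp [List.take_succ_cons] at h; exact ⟨h.1, h.2⟩
          by_cases h4 : c = 'm' ∧ cs.take 1 = ['a']
          · have ht : (c :: cs).take 2 = ['m','a'] := by
              obtain ⟨rfl, h⟩ := h4; simp [List.take_succ_cons, h]
            simp only [if_neg h1, if_neg h2, if_neg h3, if_pos h4, if_neg ht1, if_neg ht2,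
              if_neg ht3, if_pos ht, List.drop_succ_cons]
            simpa using ihd1
          · have ht4 : ¬ (c :: cs).take 2 = ['m','a'] := by
              intro h; apply h4
              simp [List.take_succ_cons] at h; exact ⟨h.1, h.2⟩
            simp [h1, h2, h3, h4]

-- A's counting fold equals n + the count of matcher-accepted strings (specific to these two ports).
theorem foldl_stripA_count (l : List String) (n : Int) :
    l.foldl (fun a b => if stripA b.toList = [] then a + 1 else a) n
      = n + ((l.countP (fun b => babMatch b.toList) : Nat) : Int) := by
  induction l generalizing n with
  | nil => simp
  | cons x xs ih =>
    simp only [List.foldl_cons, List.countP_cons, ih, babMatch_eq_stripA]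
    by_cases h : stripA x.toList = [] <;> simp [h] <;> omega

-- ===== VERDICT (by name: the statement is the Claim_ definition above) =====
theorem solution_spec : Claim_equal_solution := by
  intro babbling _
  unfold Spec_solution solution solution_alt
  rw [foldl_stripA_count]
  simp
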